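-- pv_equiv track=rewrite | github.com/sfc-gh-dzanoello/sfc-gh-sd_learn | sfc-learn-app_backend/Scripts/repair_architect_questions.py | _find_question_boundary
-- ===== SOURCE A (Python) =====
-- def _find_question_boundary(qo_lines, first_marker_idx):
--     """Find where the question text ends and options begin.
--
--     The question boundary is the last line that's clearly part of the question,
--     NOT part of the options zone. We search backwards from the first marker
--     to find where actual answer options start.
--
--     Heuristic: scan backwards from first_marker_idx. The first blank-line-separated
--     block that looks like a short answer option (not a question/scenario) marks the
--     start of the options zone. Everything before it is question text.
--     """
--     # Find the last question-like line (ends with ?)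
--     last_q_line = -1
--     for i in range(first_marker_idx - 1, -1, -1):
--         s = qo_lines[i].strip()
--         if s.endswith("?"):
--             last_q_line = i
--             break
--
--     if last_q_line >= 0:
--         # Options zone starts after the question line (skip blank lines)
--         boundary = last_q_line + 1
--         while boundary < first_marker_idx and qo_lines[boundary].strip() == "":
--             boundary += 1
--         return boundary
--
--     # Fallback: if no "?" found, use blank-line heuristic
--     # Find the last substantial blank-line gap before the first marker
--     # that separates scenario context from options
--     for i in range(first_marker_idx - 1, 0, -1):
--         if qo_lines[i].strip() == "" and qo_lines[i - 1].strip() != "":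
--             # Check if content after this blank line looks like options
--             # (short lines, not numbered list items that are scenario)
--             next_content = []
--             for j in range(i + 1, first_marker_idx):
--                 s = qo_lines[j].strip()
--                 if s:
--                     next_content.append(s)
--             if next_content and all(len(s) < 200 for s in next_content):
--                 return i + 1
--
--     return first_marker_idx
-- ===== SOURCE B (Python) =====
-- def _find_question_boundary(qo_lines, first_marker_idx):
--     """Single backward pass: maintain, for the suffix already scanned
--     (indices > i, < first_marker_idx), the first non-blank index, whether it
--     has any content, and whether all its content lines are short; the '?'
--     branch and the blank-gap fallback are decided incrementally."""
--     next_nonblank = first_marker_idx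
--     has_content = False
--     all_short = True
--     fallback = None
--     for i in range(first_marker_idx - 1, -1, -1):
--         s = qo_lines[i].strip()
--         if s.endswith("?"):
--             return next_nonblank
--         if (fallback is None and i >= 1 and s == ""
--                 and qo_lines[i - 1].strip() != "" and has_content and all_short):
--             fallback = i + 1
--         if s:
--             next_nonblank = i
--             has_content = True
--             if len(s) >= 200:
--                 all_short = False
--     return fallback if fallback is not None else first_marker_idx
-- ===== Notes on version B (the rewrite author's own statement) =====
-- stated objective: alternative
-- what changed: Replaces A's three separate scans (backward '?' search, a blank-skipping while loop, and a fallback loop that rebuilds the whole suffix content for every blank-gap candidate) by one backward pass that incrementally maintains the first non-blank suffix index and content-present/all-short suffix flags.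
-- outside the precondition, e.g. on _find_question_boundary(['x'], 2): A raises IndexError, B raises IndexError
import Mathlib
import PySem

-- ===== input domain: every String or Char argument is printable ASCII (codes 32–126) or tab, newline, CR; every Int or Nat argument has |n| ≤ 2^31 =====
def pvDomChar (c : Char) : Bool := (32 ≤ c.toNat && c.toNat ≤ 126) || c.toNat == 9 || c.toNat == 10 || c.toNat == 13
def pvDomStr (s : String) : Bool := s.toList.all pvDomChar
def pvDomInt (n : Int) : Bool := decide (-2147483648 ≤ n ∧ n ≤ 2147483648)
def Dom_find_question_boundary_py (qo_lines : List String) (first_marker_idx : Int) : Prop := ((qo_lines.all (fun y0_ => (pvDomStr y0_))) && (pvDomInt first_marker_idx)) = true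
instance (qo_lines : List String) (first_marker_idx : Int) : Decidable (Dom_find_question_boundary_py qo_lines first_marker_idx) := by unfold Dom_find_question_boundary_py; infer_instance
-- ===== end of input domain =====

-- B replaces A's three scans (backward '?' search, blank-skip while loop, per-candidate
-- forward rescans in the fallback) by ONE backward pass carrying suffix flags
-- (first non-blank index, content present, all content short); objective: alternative.

-- ===== PORT A =====
-- shared trivial accessor: stripped line i (in range on Pre_; getD "" never hit there)
def pvLine (qs : List String) (i : Int) : String :=
  PySem.Str.strip ((PySem.List.pyGet? qs i).getD "")

-- first loop of A: first index (scanning the given descending range) whose line ends with "?"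
def aQScan (qs : List String) : List Int → Int
  | [] => -1
  | i :: rest => if PySem.Str.endswith (pvLine qs i) "?" then i else aQScan qs rest

-- A's while loop: skip blank lines while boundary < first_marker_idx
def aSkip (qs : List String) (fmi b : Int) : Int :=
  if h : b < fmi ∧ pvLine qs b == "" then aSkip qs fmi (b + 1) else b
termination_by (fmi - b).toNat
decreasing_by all_goals omega

-- A's inner j-loop: collect the stripped non-blank lines of range(i+1, fmi)
def aContent (qs : List String) (fmi i : Int) : List String :=
  (PySem.List.pyRange (i + 1) fmi 1).foldl
    (fun acc j => if pvLine qs j == "" then acc else acc ++ [pvLine qs j]) []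

-- A's fallback loop over the descending range(fmi-1, 0, -1)
def aFallback (qs : List String) (fmi : Int) : List Int → Option Int
  | [] => none
  | i :: rest =>
    if pvLine qs i == "" && !(pvLine qs (i - 1) == "") then
      let nc := aContent qs fmi i
      if !nc.isEmpty && nc.all (fun s => decide (PySem.Str.len s < 200)) then some (i + 1)
      else aFallback qs fmi rest
    else aFallback qs fmi rest

def find_question_boundary_py (qo_lines : List String) (first_marker_idx : Int) : Int :=
  let lq := aQScan qo_lines (PySem.List.pyRange (first_marker_idx - 1) (-1) (-1))
  if lq ≥ 0 then aSkip qo_lines first_marker_idx (lq + 1)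
  else
    match aFallback qo_lines first_marker_idx (PySem.List.pyRange (first_marker_idx - 1) 0 (-1)) with
    | some r => r
    | none => first_marker_idx

-- ===== PORT B =====
-- one backward pass; state: next_nonblank, has_content, all_short, fallback
def bScan (qs : List String) (fmi : Int) :
    List Int → Int → Bool → Bool → Option Int → Int
  | [], _, _, _, fb => fb.getD fmi
  | i :: rest, nnb, hc, ash, fb =>
    if PySem.Str.endswith (pvLine qs i) "?" then nnb
    else
      let fb' := if fb.isNone && decide (1 ≤ i) && (pvLine qs i == "")
                    && !(pvLine qs (i - 1) == "") && hc && ash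
                 then some (i + 1) else fb
      if pvLine qs i == "" then bScan qs fmi rest nnb hc ash fb'
      else bScan qs fmi rest i true (ash && decide (PySem.Str.len (pvLine qs i) < 200)) fb'

def find_question_boundary_py_alt (qo_lines : List String) (first_marker_idx : Int) : Int :=
  bScan qo_lines first_marker_idx
    (PySem.List.pyRange (first_marker_idx - 1) (-1) (-1))
    first_marker_idx false true none

-- ===== PRECONDITION & SPEC =====
-- Pre_ excludes exactly the inputs where Python A raises IndexError:
-- first_marker_idx exceeding the list length (both programs index qo_lines up to it).
def Pre_find_question_boundary_py (qo_lines : List String) (first_marker_idx : Int) : Prop :=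
  first_marker_idx ≤ (qo_lines.length : Int)
instance (qo_lines : List String) (first_marker_idx : Int) : Decidable (Pre_find_question_boundary_py qo_lines first_marker_idx) := by unfold Pre_find_question_boundary_py; infer_instance

def pvWitness_find_question_boundary_py : List String × Int :=
  (["Is it?", "", "A) yes"], 3)

def Spec_find_question_boundary_py (qo_lines : List String) (first_marker_idx : Int) (out : Int) : Prop := out = find_question_boundary_py_alt qo_lines first_marker_idx
instance (qo_lines : List String) (first_marker_idx : Int) (out : Int) : Decidable (Spec_find_question_boundary_py qo_lines first_marker_idx out) := by unfold Spec_find_question_boundary_py; infer_instance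

-- ===== CLAIM (what is proved, stated in full; the proofs are below) =====
def Claim_equal_find_question_boundary_py : Prop := ∀ (qo_lines : List String) (first_marker_idx : Int), Dom_find_question_boundary_py qo_lines first_marker_idx → Pre_find_question_boundary_py qo_lines first_marker_idx → Spec_find_question_boundary_py qo_lines first_marker_idx (find_question_boundary_py qo_lines first_marker_idx)

-- ===== LEMMAS AND PROOFS =====

-- reference suffix flags, as upward recursions over [m, fmi)
def hasC (qs : List String) (fmi m : Int) : Bool :=
  if h : m < fmi then (!(pvLine qs m == "") || hasC qs fmi (m + 1)) else false
termination_by (fmi - m).toNat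
decreasing_by all_goals omega

def allS (qs : List String) (fmi m : Int) : Bool :=
  if h : m < fmi then
    ((pvLine qs m == "" || decide (PySem.Str.len (pvLine qs m) < 200)) && allS qs fmi (m + 1))
  else true
termination_by (fmi - m).toNat
decreasing_by all_goals omega

-- the list A's inner j-loop collects, as an upward recursion
def ncList (qs : List String) (fmi m : Int) : List String :=
  if h : m < fmi then
    (if pvLine qs m == "" then ncList qs fmi (m + 1)
     else pvLine qs m :: ncList qs fmi (m + 1))
  else []
termination_by (fmi - m).toNat
decreasing_by all_goals omega

lemma foldl_nc (qs : List String) (fmi : Int) :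
    ∀ (n : Nat) (m : Int), (fmi - m).toNat = n → ∀ (acc : List String),
    (PySem.List.pyRange m fmi 1).foldl
      (fun acc j => if pvLine qs j == "" then acc else acc ++ [pvLine qs j]) acc
    = acc ++ ncList qs fmi m := by
  intro n
  induction n with
  | zero =>
    intro m hm acc
    rw [PySem.List.pyRange_one_eq_nil (by omega), ncList]
    simp [show ¬ m < fmi by omega]
  | succ n ih =>
    intro m hm acc
    have hlt : m < fmi := by omega
    rw [PySem.List.pyRange_one_cons hlt, ncList]
    simp only [List.foldl_cons, dif_pos hlt]
    by_cases hb : pvLine qs m == ""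
    · rw [if_pos hb, if_pos hb, ih (m + 1) (by omega) acc]
    · rw [if_neg hb, if_neg hb, ih (m + 1) (by omega) (acc ++ [pvLine qs m])]
      simp

lemma aContent_eq (qs : List String) (fmi i : Int) :
    aContent qs fmi i = ncList qs fmi (i + 1) := by
  have := foldl_nc qs fmi (fmi - (i + 1)).toNat (i + 1) rfl []
  simpa [aContent] using this

lemma ncList_ne_nil (qs : List String) (fmi : Int) :
    ∀ (n : Nat) (m : Int), (fmi - m).toNat = n →
    (!(ncList qs fmi m).isEmpty) = hasC qs fmi m := by
  intro n
  induction n with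
  | zero =>
    intro m hm
    rw [ncList, hasC]
    simp [show ¬ m < fmi by omega]
  | succ n ih =>
    intro m hm
    have hlt : m < fmi := by omega
    rw [ncList, hasC]
    simp only [dif_pos hlt]
    by_cases hb : pvLine qs m == ""
    · rw [if_pos hb, ih (m + 1) (by omega), hb]
      simp
    · have hbf : (pvLine qs m == "") = false := by simpa using hb
      rw [if_neg hb, hbf]
      simp

lemma ncList_all_short (qs : List String) (fmi : Int) :
    ∀ (n : Nat) (m : Int), (fmi - m).toNat = n →
    ((ncList qs fmi m).all (fun s => decide (PySem.Str.len s < 200))) = allS qs fmi m := by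
  intro n
  induction n with
  | zero =>
    intro m hm
    rw [ncList, allS]
    simp [show ¬ m < fmi by omega]
  | succ n ih =>
    intro m hm
    have hlt : m < fmi := by omega
    rw [ncList, allS]
    simp only [dif_pos hlt]
    by_cases hb : pvLine qs m == ""
    · rw [if_pos hb, ih (m + 1) (by omega), hb, Bool.true_or, Bool.true_and]
    · have hbf : (pvLine qs m == "") = false := by simpa using hb
      rw [if_neg hb, List.all_cons, ih (m + 1) (by omega), hbf, Bool.false_or,
          Bool.and_comm]

-- unfolding equations for aSkip
lemma aSkip_stop (qs : List String) (fmi b : Int) (h : ¬ (b < fmi ∧ pvLine qs b == "")) :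
    aSkip qs fmi b = b := by rw [aSkip, dif_neg h]

lemma aSkip_step (qs : List String) (fmi b : Int) (h : b < fmi ∧ pvLine qs b == "") :
    aSkip qs fmi b = aSkip qs fmi (b + 1) := by rw [aSkip, dif_pos h]

-- main invariant: one backward step of bScan tracks A's three computations
lemma bScan_eq (qs : List String) (fmi : Int) :
    ∀ (n : Nat) (k : Int), k < fmi → (k + 1).toNat = n → ∀ (fb : Option Int),
    bScan qs fmi (PySem.List.pyRange k (-1) (-1))
      (aSkip qs fmi (k + 1)) (hasC qs fmi (k + 1)) (allS qs fmi (k + 1)) fb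
    = (let lq := aQScan qs (PySem.List.pyRange k (-1) (-1));
       if lq ≥ 0 then aSkip qs fmi (lq + 1)
       else (fb.orElse (fun _ => aFallback qs fmi (PySem.List.pyRange k 0 (-1)))).getD fmi) := by
  intro n
  induction n with
  | zero =>
    intro k hk hn fb
    rw [PySem.List.pyRange_neg_one_eq_nil (show k ≤ -1 by omega),
        PySem.List.pyRange_neg_one_eq_nil (show k ≤ 0 by omega)]
    simp only [bScan, aQScan, aFallback]
    norm_num
  | succ n ih =>
    intro k hk hn fb
    have hk0 : 0 ≤ k := by omega
    rw [PySem.List.pyRange_neg_one_cons (show (-1:Int) < k by omega)]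
    simp only [bScan, aQScan]
    by_cases hq : PySem.Str.endswith (pvLine qs k) "?"
    · rw [if_pos hq, if_pos hq, if_pos (by omega : k ≥ 0)]
    · rw [if_neg hq, if_neg hq]
      have hnnb : (if pvLine qs k == "" then aSkip qs fmi (k + 1) else k)
          = aSkip qs fmi k := by
        by_cases hb : pvLine qs k == ""
        · rw [if_pos hb, aSkip_step qs fmi k ⟨hk, hb⟩]
        · rw [if_neg hb, aSkip_stop qs fmi k (by simp [hb])]
      have hhc : (if pvLine qs k == "" then hasC qs fmi (k + 1) else true)
          = hasC qs fmi k := by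
        conv_rhs => rw [hasC]
        rw [dif_pos hk]
        by_cases hb : pvLine qs k == ""
        · rw [if_pos hb, hb]; simp
        · have hbf : (pvLine qs k == "") = false := by simpa using hb
          rw [if_neg hb, hbf]; simp
      have hash : (if pvLine qs k == "" then allS qs fmi (k + 1)
            else allS qs fmi (k + 1) && decide (PySem.Str.len (pvLine qs k) < 200))
          = allS qs fmi k := by
        conv_rhs => rw [allS]
        rw [dif_pos hk]
        by_cases hb : pvLine qs k == ""
        · rw [if_pos hb, hb, Bool.true_or, Bool.true_and]
        · have hbf : (pvLine qs k == "") = false := by simpa using hb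
          rw [if_neg hb, hbf, Bool.false_or, Bool.and_comm]
      set fb' := (if fb.isNone && decide (1 ≤ k) && (pvLine qs k == "")
                    && !(pvLine qs (k - 1) == "") && hasC qs fmi (k + 1) && allS qs fmi (k + 1)
                  then some (k + 1) else fb) with hfb'
      have hmain := ih (k - 1) (by omega) (by omega) fb'
      rw [show k - 1 + 1 = k by ring] at hmain
      by_cases hb : pvLine qs k == ""
      · rw [if_pos hb,
            show aSkip qs fmi (k + 1) = aSkip qs fmi k from by rw [← hnnb, if_pos hb],
            show hasC qs fmi (k + 1) = hasC qs fmi k from by rw [← hhc, if_pos hb],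
            show allS qs fmi (k + 1) = allS qs fmi k from by rw [← hash, if_pos hb],
            hmain]
        by_cases hlq : aQScan qs (PySem.List.pyRange (k - 1) (-1) (-1)) ≥ 0
        · simp only [hlq, if_true]
        · simp only [hlq, if_false]
          have hnc1 := ncList_ne_nil qs fmi (fmi - (k + 1)).toNat (k + 1) rfl
          have hnc2 := ncList_all_short qs fmi (fmi - (k + 1)).toNat (k + 1) rfl
          by_cases hk1 : (1:Int) ≤ k
          · rw [PySem.List.pyRange_neg_one_cons (show (0:Int) < k by omega)]
            cases fb with
            | some v => rw [hfb']; simp [Option.orElse]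
            | none =>
              by_cases hprev : pvLine qs (k - 1) == ""
              · rw [hfb']
                simp only [aFallback, hb, hprev, Option.isNone]
                simp [Option.orElse]
              · have hpf : (pvLine qs (k - 1) == "") = false := by simpa using hprev
                rw [hfb']
                simp only [aFallback, aContent_eq, hnc1, hnc2, hb, hpf, Option.isNone,
                  decide_eq_true hk1]
                by_cases h1 : hasC qs fmi (k + 1) <;> by_cases h2 : allS qs fmi (k + 1) <;>
                  simp [h1, h2, Option.orElse]
          · have hkz : k = 0 := by omega
            subst hkz
            rw [hfb']
            rw [PySem.List.pyRange_neg_one_eq_nil (show (0:Int) ≤ 0 by omega),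
                PySem.List.pyRange_neg_one_eq_nil (show (0:Int) - 1 ≤ 0 by omega)]
            simp [aFallback]
      · rw [if_neg hb]
        have hbf : (pvLine qs k == "") = false := by simpa using hb
        rw [← hnnb, ← hhc, ← hash] at hmain
        rw [if_neg hb, if_neg hb, if_neg hb] at hmain
        rw [hmain]
        have hfbeq : fb' = fb := by rw [hfb']; simp [hbf]
        by_cases hlq : aQScan qs (PySem.List.pyRange (k - 1) (-1) (-1)) ≥ 0
        · simp only [hlq, if_true]
        · simp only [hlq, if_false]
          rw [hfbeq]
          by_cases hk1 : (1:Int) ≤ k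
          · rw [PySem.List.pyRange_neg_one_cons (show (0:Int) < k by omega)]
            simp only [aFallback, hbf]
            simp
          · have hkz : k = 0 := by omega
            subst hkz
            rw [PySem.List.pyRange_neg_one_eq_nil (show (0:Int) ≤ 0 by omega),
                PySem.List.pyRange_neg_one_eq_nil (show (0:Int) - 1 ≤ 0 by omega)]

lemma boundary_eq (qs : List String) (fmi : Int) :
    find_question_boundary_py qs fmi = find_question_boundary_py_alt qs fmi := by
  unfold find_question_boundary_py find_question_boundary_py_alt
  by_cases hf : fmi ≤ 0
  · rw [PySem.List.pyRange_neg_one_eq_nil (by omega : fmi - 1 ≤ -1),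
        PySem.List.pyRange_neg_one_eq_nil (by omega : fmi - 1 ≤ 0)]
    simp [aQScan, aFallback, bScan]
  · have hf' : 0 < fmi := by omega
    have h1 : aSkip qs fmi fmi = fmi := aSkip_stop qs fmi fmi (by omega)
    have h2 : hasC qs fmi fmi = false := by rw [hasC, dif_neg (by omega)]
    have h3 : allS qs fmi fmi = true := by rw [allS, dif_neg (by omega)]
    have := bScan_eq qs fmi fmi.toNat (fmi - 1) (by omega) (by omega) none
    rw [show fmi - 1 + 1 = fmi by ring, h1, h2, h3] at this
    rw [this]
    by_cases hlq : aQScan qs (PySem.List.pyRange (fmi - 1) (-1) (-1)) ≥ 0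
    · simp only [hlq, if_true]
    · simp only [hlq, if_false]
      cases aFallback qs fmi (PySem.List.pyRange (fmi - 1) 0 (-1)) <;> simp [Option.orElse]

-- ===== VERDICT (by name: the statement is the Claim_ definition above) =====
theorem find_question_boundary_py_spec : Claim_equal_find_question_boundary_py := by
  intro qs fmi _ _
  exact boundary_eq qs fmi
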